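-- pv_equiv track=rewrite | github.com/SakethReddyVemula/transformer-sslm | fairseq/models/transformer_sslm.py | map_prechars2lex
-- ===== SOURCE A (Python) =====
-- def map_prechars2lex(chars2lex):
--     char_indices = list(chars2lex.keys())
--
--     prechars2lex = {}
--     for chars in char_indices:
--         seg_len = len(chars)
--         if seg_len == 1:
--             continue
--
--         for end in range(1, seg_len):
--             prechars = chars[0: end]
--             if prechars in prechars2lex:
--                 prechars2lex[prechars].append(chars2lex[chars])
--             else:
--                 prechars2lex[prechars] = [chars2lex[chars]]
--
--     return prechars2lex
-- ===== SOURCE B (Python) =====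
-- def map_prechars2lex(chars2lex):
--     # Build the flat (prefix, value) pair list, then group by first-occurrence order.
--     pairs = [(chars[:end], val)
--              for chars, val in chars2lex.items() if len(chars) != 1
--              for end in range(1, len(chars))]
--     order = list(dict.fromkeys(p for p, _ in pairs))
--     return {p: [v for q, v in pairs if q == p] for p in order}
-- ===== Notes on version B (the rewrite author's own statement) =====
-- stated objective: alternative
-- what changed: A builds the result dict incrementally with an append-or-create branch inside a nested scan; B first flattens all (prefix, value) pairs into one list, computes the first-occurrence key order with dict.fromkeys, and then builds each group by filtering the pair list per key.
import Mathlib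
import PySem

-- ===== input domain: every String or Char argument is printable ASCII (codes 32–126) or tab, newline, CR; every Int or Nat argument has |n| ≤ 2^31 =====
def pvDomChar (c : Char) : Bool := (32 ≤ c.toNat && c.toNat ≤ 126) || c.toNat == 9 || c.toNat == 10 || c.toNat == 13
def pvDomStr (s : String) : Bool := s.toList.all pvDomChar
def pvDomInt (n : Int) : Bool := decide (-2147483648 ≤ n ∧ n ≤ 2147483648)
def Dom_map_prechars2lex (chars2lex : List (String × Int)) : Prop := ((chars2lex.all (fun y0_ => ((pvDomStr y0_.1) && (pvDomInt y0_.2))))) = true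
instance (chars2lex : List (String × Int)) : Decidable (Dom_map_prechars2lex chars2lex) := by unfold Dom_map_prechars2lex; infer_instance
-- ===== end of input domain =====

-- B replaces A's incremental append-or-create dict loop by flatten-pairs, dedup the
-- prefix keys in first-occurrence order, then collect each group by a per-key filter
-- (objective: alternative decomposition, same results; no speed claim).

-- ===== PORT A =====
def map_prechars2lex (chars2lex : List (String × Int)) : List (String × List Int) :=
  let d := PySem.Dict.ofList chars2lex
  let charIndices := d.keys
  let prechars2lex :=
    charIndices.foldl (fun pre chars =>
      let segLen := PySem.Str.len chars
      if segLen = 1 then pre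
      else
        (PySem.List.pyRange 1 segLen 1).foldl (fun pre e =>
          let prechars := PySem.Str.slice chars (some 0) (some e)
          if pre.contains prechars then
            pre.insert prechars (pre.getD prechars [] ++ [d.getD chars 0])
          else
            pre.insert prechars [d.getD chars 0]) pre)
      PySem.Dict.empty
  prechars2lex.items

-- ===== PORT B =====
def map_prechars2lex_alt (chars2lex : List (String × Int)) : List (String × List Int) :=
  let d := PySem.Dict.ofList chars2lex
  let pairs := d.items.flatMap (fun kv =>
    if PySem.Str.len kv.1 = 1 then []
    else (PySem.List.pyRange 1 (PySem.Str.len kv.1) 1).map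
      (fun e => (PySem.Str.slice kv.1 (some 0) (some e), kv.2)))
  let order := PySem.List.dedup (pairs.map Prod.fst)
  order.map (fun p => (p, (pairs.filter (fun qv => qv.1 == p)).map Prod.snd))

-- ===== PRECONDITION & SPEC =====
def Spec_map_prechars2lex (chars2lex : List (String × Int)) (out : List (String × List Int)) : Prop := out = map_prechars2lex_alt chars2lex
instance (chars2lex : List (String × Int)) (out : List (String × List Int)) : Decidable (Spec_map_prechars2lex chars2lex out) := by unfold Spec_map_prechars2lex; infer_instance

-- ===== CLAIM (what is proved, stated in full; the proofs are below) =====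
def Claim_equal_map_prechars2lex : Prop := ∀ (chars2lex : List (String × Int)), Dom_map_prechars2lex chars2lex → Spec_map_prechars2lex chars2lex (map_prechars2lex chars2lex)

-- ===== LEMMAS AND PROOFS =====

-- A's append-or-create branch is exactly Python's d[k] = d.get(k, []) + [v], i.e. Dict.modify.
theorem step_eq_modify (pre : PySem.Dict String (List Int)) (k : String) (v : Int) :
    (if pre.contains k then pre.insert k (pre.getD k [] ++ [v]) else pre.insert k [v])
      = pre.modify k [] (· ++ [v]) := by
  by_cases h : pre.contains k = true
  · simp [h, PySem.Dict.modify]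
  · rw [PySem.Dict.modify, PySem.Dict.getD_of_not_contains] <;> simp [h]

-- the flat (prefix, value) pair list both sides work through
def pvPairs (d : PySem.Dict String Int) : List (String × Int) :=
  d.items.flatMap (fun kv =>
    if PySem.Str.len kv.1 = 1 then []
    else (PySem.List.pyRange 1 (PySem.Str.len kv.1) 1).map
      (fun e => (PySem.Str.slice kv.1 (some 0) (some e), kv.2)))

-- A's nested loop is the modify-fold over the flat pair list
theorem portA_eq_foldl_pairs (d : PySem.Dict String Int) (hnd : d.keys.Nodup) :
    d.keys.foldl (fun pre chars =>
      let segLen := PySem.Str.len chars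
      if segLen = 1 then pre
      else
        (PySem.List.pyRange 1 segLen 1).foldl (fun pre e =>
          let prechars := PySem.Str.slice chars (some 0) (some e)
          if pre.contains prechars then
            pre.insert prechars (pre.getD prechars [] ++ [d.getD chars 0])
          else
            pre.insert prechars [d.getD chars 0]) pre)
      PySem.Dict.empty
    = (pvPairs d).foldl (fun pre p => pre.modify p.1 [] (· ++ [p.2])) PySem.Dict.empty := by
  have hitems : d.items = d.keys.map (fun k => (k, d.getD k 0)) :=
    PySem.Dict.items_eq_map_keys d hnd 0
  unfold pvPairs
  rw [hitems, List.flatMap_map, List.foldl_flatMap]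
  apply PySem.List.foldl_congr_mem
  intro pre chars _
  simp only [step_eq_modify]
  split_ifs with h1
  · rfl
  · rw [List.foldl_map]

-- the grouped dict's items are B's dedup-then-filter grouping
theorem items_foldl_modify_grouped (L : List (String × Int)) :
    (L.foldl (fun pre p => pre.modify p.1 [] (· ++ [p.2])) PySem.Dict.empty).items
      = (PySem.List.dedup (L.map Prod.fst)).map
          (fun p => (p, (L.filter (fun qv => qv.1 == p)).map Prod.snd)) := by
  set D := L.foldl (fun pre p => pre.modify p.1 [] (· ++ [p.2])) PySem.Dict.empty with hD
  have hkeys : D.keys = PySem.List.dedup (L.map Prod.fst) := by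
    rw [hD, PySem.Dict.keys_foldl_modify_key]
    simp [PySem.Dict.keys_empty, PySem.Set.update_nil_left, PySem.List.dedup_eq_ofList]
  have hnd : D.keys.Nodup := by
    rw [hkeys]; exact PySem.List.nodup_dedup _
  have hget : ∀ c, D.getD c [] = (L.filter (fun qv => qv.1 == c)).map Prod.snd := by
    intro c
    rw [hD, PySem.Dict.getD_foldl_modify_append, PySem.Dict.getD_empty]
    simp
  rw [PySem.Dict.items_eq_map_keys D hnd [], hkeys]
  apply List.map_congr_left
  intro p _
  rw [hget p]

-- ===== VERDICT (by name: the statement is the Claim_ definition above) =====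
theorem map_prechars2lex_spec : Claim_equal_map_prechars2lex := by
  intro chars2lex _
  unfold Spec_map_prechars2lex map_prechars2lex map_prechars2lex_alt
  dsimp only
  rw [portA_eq_foldl_pairs _ (PySem.Dict.nodup_keys_ofList chars2lex),
      items_foldl_modify_grouped]
  rfl
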